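-- pv_equiv track=rewrite | github.com/AnkitAvi11/Data-Structures-And-Algorithms | Arrays/balance.py | balance_string
-- ===== SOURCE A (Python) =====
-- def balance_string(string : str) -> int :
--     stack = list();count=0
--
--     for char in string :
--         if char == 'a' :
--             if stack and stack[len(stack)-1] == 'b':
--                 count+=1
--                 stack.pop()
--         else :
--             stack.append(char)
--
--     return count
-- ===== SOURCE B (Python) =====
-- def _step(count, avail, char):
--     # pure transition: one character acting on (matched pairs, exposed 'b' count)
--     if char == 'a':
--         return (count + 1, avail - 1) if avail else (count, avail)
--     if char == 'b':
--         return (count, avail + 1)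
--     return (count, 0)  # any other char blocks the b's beneath it
--
--
-- def balance_string(string: str) -> int:
--     count = avail = 0
--     for char in string:
--         count, avail = _step(count, avail, char)
--     return count
-- ===== Notes on version B (the rewrite author's own statement) =====
-- stated objective: simpler
-- what changed: Replaces the character stack with a fold of a pure per-character transition on a pair (matched count, number of consecutive 'b's exposed on top); any other character resets that counter to 0 since it blocks the b's beneath, so no list is ever built.
import Mathlib
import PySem

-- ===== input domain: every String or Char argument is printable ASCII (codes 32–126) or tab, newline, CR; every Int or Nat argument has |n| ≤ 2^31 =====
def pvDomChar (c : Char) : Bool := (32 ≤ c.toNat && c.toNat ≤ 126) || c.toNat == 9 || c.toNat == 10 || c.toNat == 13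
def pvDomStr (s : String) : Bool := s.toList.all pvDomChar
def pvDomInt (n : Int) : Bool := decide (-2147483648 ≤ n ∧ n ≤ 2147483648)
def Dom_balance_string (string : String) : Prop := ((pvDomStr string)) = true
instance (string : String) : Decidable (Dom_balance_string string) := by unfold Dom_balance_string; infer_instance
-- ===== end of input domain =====

-- ===== PORT A =====
-- B folds a pure per-character transition on a pair (count, exposed-'b' counter) instead of A's character stack (objective: simpler, O(1) space).
def balance_string_loop (cs : List Char) (stack : List Char) (count : Int) : Int :=
  match cs with
  | [] => count
  | char :: rest =>
    if char = 'a' then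
      if stack ≠ [] ∧ stack.getLast? = some 'b' then
        balance_string_loop rest stack.dropLast (count + 1)
      else
        balance_string_loop rest stack count
    else
      balance_string_loop rest (stack ++ [char]) count

def balance_string (string : String) : Int :=
  balance_string_loop string.toList [] 0

-- ===== PORT B =====
-- _step: one character acting on the pair (matched count, exposed trailing-'b' count)
def balance_string_alt_step (st : Int × Int) (char : Char) : Int × Int :=
  if char = 'a' then
    if st.2 ≠ 0 then (st.1 + 1, st.2 - 1) else st
  else if char = 'b' then
    (st.1, st.2 + 1)
  else
    (st.1, 0)

def balance_string_alt (string : String) : Int :=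
  (string.toList.foldl balance_string_alt_step (0, 0)).1

-- ===== PRECONDITION & SPEC =====
def Spec_balance_string (string : String) (out : Int) : Prop := out = balance_string_alt string
instance (string : String) (out : Int) : Decidable (Spec_balance_string string out) := by unfold Spec_balance_string; infer_instance

-- ===== CLAIM (what is proved, stated in full; the proofs are below) =====
def Claim_equal_balance_string : Prop := ∀ (string : String), Dom_balance_string string → Spec_balance_string string (balance_string string)

-- ===== LEMMAS AND PROOFS =====
-- leading-'b' count of the REVERSED stack = number of 'b's exposed at the stack top
def pvLB : List Char → Int
  | [] => 0
  | c :: t => if c = 'b' then pvLB t + 1 else 0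

theorem pvLB_cons (c : Char) (t : List Char) :
    pvLB (c :: t) = if c = 'b' then pvLB t + 1 else 0 := rfl

theorem pvLB_b (t : List Char) : pvLB ('b' :: t) = pvLB t + 1 := by
  rw [pvLB_cons, if_pos rfl]

theorem pvLB_nonneg (r : List Char) : 0 ≤ pvLB r := by
  induction r with
  | nil => simp [pvLB]
  | cons c t ih => rw [pvLB_cons]; split <;> omega

theorem balance_loops_agree (cs : List Char) :
    ∀ (r : List Char) (count : Int),
      balance_string_loop cs r.reverse count =
        (List.foldl balance_string_alt_step (count, pvLB r) cs).1 := by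
  induction cs with
  | nil => intro r count; rfl
  | cons char rest ih =>
    intro r count
    by_cases ha : char = 'a'
    · subst ha
      cases r with
      | nil =>
        simpa [balance_string_loop, balance_string_alt_step, pvLB] using ih [] count
      | cons h t =>
        by_cases hb : h = 'b'
        · subst hb
          have hne : pvLB ('b' :: t) ≠ 0 := by
            have := pvLB_nonneg t; rw [pvLB_b]; omega
          have hav : pvLB ('b' :: t) - 1 = pvLB t := by rw [pvLB_b]; omega
          simpa [balance_string_loop, balance_string_alt_step, List.getLast?_reverse,
            hne, hav, List.reverse_cons] using ih t (count + 1)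
        · have hlb : pvLB (h :: t) = 0 := by rw [pvLB_cons, if_neg hb]
          simpa [balance_string_loop, balance_string_alt_step, List.getLast?_reverse,
            hb, hlb] using ih (h :: t) count
    · by_cases hb : char = 'b'
      · subst hb
        have hb1 : pvLB ('b' :: r) = pvLB r + 1 := pvLB_b r
        simpa [balance_string_loop, balance_string_alt_step, hb1] using ih ('b' :: r) count
      · have hlb : pvLB (char :: r) = 0 := by rw [pvLB_cons, if_neg hb]
        simpa [balance_string_loop, balance_string_alt_step, ha, hb, hlb] using ih (char :: r) count

-- ===== VERDICT (by name: the statement is the Claim_ definition above) =====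
theorem balance_string_spec : Claim_equal_balance_string := by
  intro s _
  unfold Spec_balance_string balance_string balance_string_alt
  simpa [pvLB] using balance_loops_agree s.toList [] 0
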